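-- pv_equiv track=rewrite | github.com/IacobIlinca/Facultate | Year1/First semester/Python/divide&conquer/exista_impare.py | odd_numbers_in_list2
-- ===== SOURCE A (Python) =====
-- def odd_numbers_in_list(lst):
--     if len(lst) == 0:
--         return False
--     if len(lst) == 1:
--         if lst[0] % 2 == 1:
--             return True
--         else:
--             return False
--     return (lst[0] % 2 == 1) or odd_numbers_in_list(lst[1:])
--
-- def odd_numbers_in_list2(lst):
--     if len(lst) == 0:
--         return False
--     if len(lst) == 1:
--         if lst[0] % 2 == 1:
--             return True
--         else:
--             return False
--     middle = len(lst) // 2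
--     return odd_numbers_in_list2(lst[:middle]) or odd_numbers_in_list(lst[middle:])
-- ===== SOURCE B (Python) =====
-- def odd_numbers_in_list2(lst):
--     for x in lst:
--         if x % 2 == 1:
--             return True
--     return False
-- ===== Notes on version B (the rewrite author's own statement) =====
-- stated objective: simpler
-- what changed: Replaced the slice-based divide-and-conquer recursion (plus its linear-recursive helper) with a single flat for-loop that returns True at the first odd element.
import Mathlib
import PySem

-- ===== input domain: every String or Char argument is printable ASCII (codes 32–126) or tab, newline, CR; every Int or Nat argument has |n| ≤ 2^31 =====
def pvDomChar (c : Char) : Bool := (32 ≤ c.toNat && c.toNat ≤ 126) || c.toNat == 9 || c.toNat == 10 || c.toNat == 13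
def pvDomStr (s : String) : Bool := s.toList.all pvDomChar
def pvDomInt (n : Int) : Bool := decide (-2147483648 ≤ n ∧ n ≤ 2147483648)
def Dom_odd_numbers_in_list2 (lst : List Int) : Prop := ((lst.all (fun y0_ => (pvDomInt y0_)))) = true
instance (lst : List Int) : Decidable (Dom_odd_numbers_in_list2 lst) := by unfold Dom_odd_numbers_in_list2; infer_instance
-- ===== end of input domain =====

-- B replaces A's slice-based divide-and-conquer recursion with a single flat scan that returns at the first odd element (objective: simpler).

-- ===== PORT A =====
-- helper odd_numbers_in_list from the same module (linear slice recursion), used by A on the right half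
def pvOddNumbersInList (lst : List Int) : Bool :=
  if lst.length = 0 then false
  else if lst.length = 1 then
    if PySem.Int.mod lst.headI 2 == 1 then true else false
  else
    (PySem.Int.mod lst.headI 2 == 1) || pvOddNumbersInList (PySem.List.slice lst (some 1) none)
termination_by lst.length
decreasing_by
  simp only [PySem.List.slice_from_one, List.length_tail]; omega

def odd_numbers_in_list2 (lst : List Int) : Bool :=
  if lst.length = 0 then false
  else if lst.length = 1 then
    if PySem.Int.mod lst.headI 2 == 1 then true else false
  else
    -- middle = len(lst) // 2, inlined into the two slices
    odd_numbers_in_list2 (PySem.List.slice lst none (some (PySem.Int.floordiv (lst.length : Int) 2))) ||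
      pvOddNumbersInList (PySem.List.slice lst (some (PySem.Int.floordiv (lst.length : Int) 2)) none)
termination_by lst.length
decreasing_by
  rw [show ((2:Int)) = ((2:Nat):Int) from by norm_num, PySem.Int.floordiv_natCast,
    PySem.List.slice_to_natCast]
  simp only [List.length_take]
  omega

-- ===== PORT B =====
def odd_numbers_in_list2_alt (lst : List Int) : Bool :=
  match lst with
  | [] => false
  | x :: rest => if PySem.Int.mod x 2 == 1 then true else odd_numbers_in_list2_alt rest

-- ===== PRECONDITION & SPEC =====
def Spec_odd_numbers_in_list2 (lst : List Int) (out : Bool) : Prop := out = odd_numbers_in_list2_alt lst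
instance (lst : List Int) (out : Bool) : Decidable (Spec_odd_numbers_in_list2 lst out) := by unfold Spec_odd_numbers_in_list2; infer_instance

-- ===== CLAIM (what is proved, stated in full; the proofs are below) =====
def Claim_equal_odd_numbers_in_list2 : Prop := ∀ (lst : List Int), Dom_odd_numbers_in_list2 lst → Spec_odd_numbers_in_list2 lst (odd_numbers_in_list2 lst)

-- ===== LEMMAS AND PROOFS =====

theorem alt_eq_any (lst : List Int) :
    odd_numbers_in_list2_alt lst = lst.any (fun x => PySem.Int.mod x 2 == 1) := by
  induction lst with
  | nil => rfl
  | cons x rest ih =>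
    simp only [odd_numbers_in_list2_alt, List.any_cons, ih]
    split_ifs with h
    · rw [h, Bool.true_or]
    · rw [Bool.not_eq_true] at h
      rw [h, Bool.false_or]

theorem helper_eq_any (lst : List Int) :
    pvOddNumbersInList lst = lst.any (fun x => PySem.Int.mod x 2 == 1) := by
  induction lst with
  | nil => rw [pvOddNumbersInList]; simp
  | cons x rest ih =>
    cases rest with
    | nil =>
      rw [pvOddNumbersInList, if_neg (by simp), if_pos (by simp)]
      simp only [List.headI, List.any_cons, List.any_nil, Bool.or_false]
      split_ifs with h
      · exact h.symm
      · exact ((Bool.not_eq_true _).mp h).symm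
    | cons y t =>
      rw [pvOddNumbersInList, if_neg (by simp), if_neg (by simp)]
      rw [PySem.List.slice_from_one]
      simp only [List.tail_cons, List.headI, List.any_cons] at ih ⊢
      rw [ih]

theorem a_eq_any (lst : List Int) :
    odd_numbers_in_list2 lst = lst.any (fun x => PySem.Int.mod x 2 == 1) := by
  fun_induction odd_numbers_in_list2 lst with
  | case1 lst h =>
    rw [List.length_eq_zero_iff] at h; subst h; rfl
  | case2 lst h0 h1 h =>
    obtain ⟨x, rfl⟩ := List.length_eq_one_iff.mp h1
    simp only [List.headI] at h
    simp only [List.any_cons, List.any_nil, Bool.or_false]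
    exact h.symm
  | case3 lst h0 h1 h =>
    obtain ⟨x, rfl⟩ := List.length_eq_one_iff.mp h1
    simp only [List.headI] at h
    rw [Bool.not_eq_true] at h
    simp only [List.any_cons, List.any_nil, Bool.or_false]
    exact h.symm
  | case4 lst h0 h1 ih =>
    rw [ih, helper_eq_any, ← List.any_append]
    rw [show ((2:Int)) = ((2:Nat):Int) from by norm_num, PySem.Int.floordiv_natCast,
      PySem.List.slice_to_natCast, PySem.List.slice_from_natCast, List.take_append_drop]

-- ===== VERDICT (by name: the statement is the Claim_ definition above) =====
theorem odd_numbers_in_list2_spec : Claim_equal_odd_numbers_in_list2 := by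
  intro lst _
  unfold Spec_odd_numbers_in_list2
  rw [alt_eq_any, a_eq_any]
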